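-- pv_equiv track=rewrite | github.com/Saketh-Reddy-Bejadi/Python | Practice/Game with Colored Marbles.py | solve
-- ===== SOURCE A (Python) =====
-- def solve(l):
--     d1,d2={},{}
--     for i in range(len(l)):
--         d1[l[i]]=d1.get(l[i],0)+1
--     l.sort()
--     for k,v in d1.items():
--         if v not in d2:
--             d2[v]=[]
--         d2[v].append(k)
--     a=0
--     for i,j in d2.items():
--         if i==1:
--             t=(len(j)//2)+(len(j)%2)
--             a+=(t*2)
--         else:
--             a+=len(j)
--     return a
-- ===== SOURCE B (Python) =====
-- def solve(l):
--     s = sorted(l)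
--     n = len(s)
--     others = 0
--     singles = 0
--     i = 0
--     while i < n:
--         j = i + 1
--         while j < n and s[j] == s[i]:
--             j += 1
--         if j - i == 1:
--             singles += 1
--         else:
--             others += 1
--         i = j
--     return others + 2 * ((singles + 1) // 2)
-- ===== Notes on version B (the rewrite author's own statement) =====
-- stated objective: alternative
-- what changed: B replaces A's two hash dicts (value->count, then count->list of values) by sort-then-scan: it sorts a copy of the list and walks it run by run with two integer counters (singleton runs, longer runs), then returns others + 2*ceil(singles/2); return value only - A also sorts its argument in place, B sorts a copy.
import Mathlib
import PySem

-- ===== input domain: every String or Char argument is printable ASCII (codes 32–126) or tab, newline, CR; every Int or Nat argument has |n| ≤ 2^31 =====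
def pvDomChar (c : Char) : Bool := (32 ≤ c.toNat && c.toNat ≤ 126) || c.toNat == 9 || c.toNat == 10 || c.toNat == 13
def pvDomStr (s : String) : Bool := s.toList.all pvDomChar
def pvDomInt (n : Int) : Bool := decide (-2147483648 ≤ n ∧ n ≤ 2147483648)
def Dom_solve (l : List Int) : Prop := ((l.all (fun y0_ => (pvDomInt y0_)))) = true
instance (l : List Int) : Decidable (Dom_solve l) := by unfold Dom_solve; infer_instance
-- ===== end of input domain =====

-- B replaces A's two dicts (value→count, then count→list of values) by sort-then-scan over runs of
-- equal values; equivalence is about the RETURN value only: A sorts its argument in place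
-- (l.sort()), B sorts a copy.

-- ===== PORT A =====
-- d1: for i in range(len(l)): d1[l[i]] = d1.get(l[i], 0) + 1
def solve_d1 (l : List Int) : PySem.Dict Int Int :=
  (PySem.List.pyRange 0 (PySem.List.len l) 1).foldl
    (fun d i => d.insert (PySem.List.pyGetD l i 0) (d.getD (PySem.List.pyGetD l i 0) 0 + 1))
    PySem.Dict.empty

-- d2: for k,v in d1.items(): if v not in d2: d2[v]=[] ; d2[v].append(k)
-- ('ensure key then append' is exactly d2[v] = d2.get(v, []) + [k], i.e. Dict.modify)
def solve_d2 (l : List Int) : PySem.Dict Int (List Int) :=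
  (solve_d1 l).items.foldl (fun d kv => d.modify kv.2 [] (fun j => j ++ [kv.1])) PySem.Dict.empty

-- NOTE: A's l.sort() only mutates the argument in place; it does not influence the return value.
def solve (l : List Int) : Int :=
  (solve_d2 l).items.foldl
    (fun a ij =>
      if ij.1 == 1 then
        a + (PySem.Int.floordiv ((ij.2.length : Int)) 2 + PySem.Int.mod ((ij.2.length : Int)) 2) * 2
      else a + (ij.2.length : Int))
    0

-- ===== PORT B =====
-- the outer 'while i < n' of Source B: each step consumes one maximal run s[i..j) of equal values
-- (the inner 'while j < n and s[j] == s[i]' is the takeWhile over the tail), counting singleton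
-- runs and longer runs.
def altGo : List Int → Int × Int
  | [] => (0, 0)
  | x :: xs =>
    let run := xs.takeWhile (fun y => y == x)
    let rest := xs.dropWhile (fun y => y == x)
    let p := altGo rest
    if run.length = 0 then (p.1, p.2 + 1) else (p.1 + 1, p.2)
  termination_by m => m.length
  decreasing_by
    have := List.length_dropWhile_le (fun y => y == x) xs
    simp only [List.length_cons]
    omega

def solve_alt (l : List Int) : Int :=
  let s := PySem.List.sorted l (fun x => x) false
  let p := altGo s
  p.1 + 2 * PySem.Int.floordiv (p.2 + 1) 2

-- ===== PRECONDITION & SPEC =====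
def Spec_solve (l : List Int) (out : Int) : Prop := out = solve_alt l
instance (l : List Int) (out : Int) : Decidable (Spec_solve l out) := by unfold Spec_solve; infer_instance

-- ===== CLAIM (what is proved, stated in full; the proofs are below) =====
def Claim_equal_solve : Prop := ∀ (l : List Int), Dom_solve l → Spec_solve l (solve l)

-- ===== LEMMAS AND PROOFS =====

-- the list of per-colour frequencies (one entry per distinct colour, first-occurrence order)
def pvFreqs (l : List Int) : List Int :=
  (PySem.Set.ofList l).map (fun k => ((l.count k : Nat) : Int))

lemma solve_d1_eq (l : List Int) : solve_d1 l = PySem.Dict.counter l := by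
  unfold solve_d1
  exact (PySem.List.foldl_pyRange_zero_pyGetD l 0
      (fun (d : PySem.Dict Int Int) (x : Int) => d.insert x (d.getD x 0 + 1))
      PySem.Dict.empty).trans
    (PySem.Dict.foldl_insert_getD_add_one_eq_counter l)

lemma solve_d2_keys (l : List Int) : (solve_d2 l).keys = PySem.Set.ofList (pvFreqs l) := by
  unfold solve_d2
  rw [solve_d1_eq]
  have h1 : ((PySem.Dict.counter l).items.foldl
      (fun d kv => d.modify kv.2 [] (fun j => j ++ [kv.1])) PySem.Dict.empty).keys
      = PySem.Set.update (PySem.Dict.empty : PySem.Dict Int (List Int)).keys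
          ((PySem.Dict.counter l).items.map (fun kv => kv.2)) :=
    PySem.Dict.keys_foldl_modify_key (PySem.Dict.counter l).items (fun kv => kv.2) []
      (fun _ kv => (fun j => j ++ [kv.1])) PySem.Dict.empty
  rw [h1]
  simp [PySem.Dict.items_counter, PySem.Set.update_nil_left, pvFreqs, List.map_map,
    Function.comp_def]

lemma solve_d2_nodup (l : List Int) : (solve_d2 l).keys.Nodup := by
  unfold solve_d2
  exact PySem.Dict.nodup_keys_foldl_modify_key (solve_d1 l).items
    (fun (kv : Int × Int) => kv.2) []
    (fun (_ : PySem.Dict Int (List Int)) (kv : Int × Int) => (fun j => j ++ [kv.1]))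
    PySem.Dict.empty PySem.Dict.nodup_keys_empty

lemma solve_d2_getD (l : List Int) (c : Int) :
    ((solve_d2 l).getD c []).length = (pvFreqs l).count c := by
  unfold solve_d2
  rw [solve_d1_eq]
  have h1 : ((PySem.Dict.counter l).items.foldl
      (fun d kv => d.modify kv.2 [] (fun j => j ++ [kv.1])) PySem.Dict.empty)
      = (((PySem.Dict.counter l).items.map Prod.swap).foldl
          (fun d p => d.modify p.1 [] (fun j => j ++ [p.2])) PySem.Dict.empty) :=
    (List.foldl_map (f := Prod.swap)
      (g := fun d p => d.modify p.1 [] (fun j => j ++ [p.2]))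
      (l := (PySem.Dict.counter l).items) (init := PySem.Dict.empty)).symm
  rw [h1, PySem.Dict.getD_foldl_modify_append]
  simp [PySem.Dict.items_counter, pvFreqs, List.map_map, ← List.countP_eq_length_filter,
    List.countP_map, List.count_eq_countP, Function.comp_def, Prod.swap]

lemma sum_ite_mem (a D : Int) (S : List Int) (h : S.Nodup) :
    (S.map (fun i => if i = a then D else 0)).sum = if a ∈ S then D else 0 := by
  induction S with
  | nil => simp
  | cons b S ih =>
    simp only [List.nodup_cons] at h
    by_cases hb : b = a
    · subst hb
      have hz : (S.map (fun i => if i = b then D else 0)).sum = 0 := by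
        apply List.sum_eq_zero
        intro x hx
        rcases List.mem_map.1 hx with ⟨i, hiS, rfl⟩
        refine if_neg (fun he => h.1 ?_)
        rw [← he]; exact hiS
      simp [hz]
    · have hab : ¬ a = b := fun he => hb he.symm
      simp [hb, hab, ih h.2]

lemma sum_counts (F : List Int) :
    ((PySem.Set.ofList F).map (fun i => ((F.count i : Nat) : Int))).sum = (F.length : Int) := by
  have hperm : (PySem.Set.ofList F).Perm F.dedup := by
    rw [List.perm_ext_iff_of_nodup (PySem.Set.nodup_ofList F) (List.nodup_dedup F)]
    intro a; rw [PySem.Set.mem_ofList, List.mem_dedup]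
  calc ((PySem.Set.ofList F).map (fun i => ((F.count i : Nat) : Int))).sum
      = (F.dedup.map (fun i => ((F.count i : Nat) : Int))).sum :=
        (hperm.map _).sum_eq
    _ = (((F.dedup.map (fun i => (F.count i : Nat))).sum : Nat) : Int) := by
        rw [Nat.cast_list_sum, List.map_map]; rfl
    _ = (F.length : Int) := by
        rw [List.sum_map_count_dedup_eq_length]

lemma solve_closed (l : List Int) :
    solve l = ((pvFreqs l).length : Int)
      + (if (1 : Int) ∈ PySem.Set.ofList (pvFreqs l) then
          ((((pvFreqs l).count 1 : Nat) : Int) / 2 + (((pvFreqs l).count 1 : Nat) : Int) % 2) * 2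
            - ((pvFreqs l).count 1 : Nat)
         else 0) := by
  unfold solve
  set F := pvFreqs l with hF
  calc (solve_d2 l).items.foldl
        (fun a ij =>
          if ij.1 == 1 then
            a + (PySem.Int.floordiv ((ij.2.length : Int)) 2 + PySem.Int.mod ((ij.2.length : Int)) 2) * 2
          else a + (ij.2.length : Int)) 0
      = (solve_d2 l).items.foldl
        (fun a ij => a + (if ij.1 == 1 then
            (PySem.Int.floordiv ((ij.2.length : Int)) 2 + PySem.Int.mod ((ij.2.length : Int)) 2) * 2
          else (ij.2.length : Int))) 0 := by
        apply PySem.List.foldl_congr_mem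
        intro a ij _
        by_cases h : ij.1 == 1 <;> simp [h]
    _ = 0 + ((solve_d2 l).items.map (fun ij => (if ij.1 == 1 then
            (PySem.Int.floordiv ((ij.2.length : Int)) 2 + PySem.Int.mod ((ij.2.length : Int)) 2) * 2
          else (ij.2.length : Int)))).sum := PySem.List.foldl_add _ _ _
    _ = ((PySem.Set.ofList F).map (fun i =>
            if i == 1 then
              (PySem.Int.floordiv ((F.count i : Nat) : Int) 2
                + PySem.Int.mod ((F.count i : Nat) : Int) 2) * 2
            else ((F.count i : Nat) : Int))).sum := by
        rw [PySem.Dict.items_eq_map_keys _ (solve_d2_nodup l) [], List.map_map]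
        rw [solve_d2_keys l, ← hF, zero_add]
        congr 1
        apply List.map_congr_left
        intro i _
        simp only [Function.comp_def]
        rw [solve_d2_getD l i, ← hF]
    _ = ((PySem.Set.ofList F).map (fun i => ((F.count i : Nat) : Int)
            + (if i = 1 then
                (((F.count 1 : Nat) : Int) / 2 + ((F.count 1 : Nat) : Int) % 2) * 2
                  - ((F.count 1 : Nat) : Int)
              else 0))).sum := by
        congr 1
        apply List.map_congr_left
        intro i _
        by_cases h : i = 1
        · subst h
          simp only [beq_self_eq_true, if_true]
          rw [PySem.Int.floordiv_eq_ediv_of_pos (by norm_num),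
            PySem.Int.mod_eq_emod_of_pos (by norm_num)]
          ring
        · simp [h]
    _ = ((PySem.Set.ofList F).map (fun i => ((F.count i : Nat) : Int))).sum
          + ((PySem.Set.ofList F).map (fun i =>
              if i = 1 then
                (((F.count 1 : Nat) : Int) / 2 + ((F.count 1 : Nat) : Int) % 2) * 2
                  - ((F.count 1 : Nat) : Int)
              else 0)).sum := List.sum_map_add
    _ = (F.length : Int)
          + (if (1 : Int) ∈ PySem.Set.ofList F then
              (((F.count 1 : Nat) : Int) / 2 + ((F.count 1 : Nat) : Int) % 2) * 2
                - ((F.count 1 : Nat) : Int)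
            else 0) := by
        rw [sum_counts, sum_ite_mem _ _ _ (PySem.Set.nodup_ofList F)]

-- ---- B-side: altGo on a sorted list counts the distinct values by whether their count is 1 ----

lemma foldl_add_cons_notmem {s : List Int} (a : Int) (l : List Int) (ha : a ∉ l) :
    l.foldl PySem.Set.add (a :: s) = a :: l.foldl PySem.Set.add s := by
  induction l generalizing s with
  | nil => rfl
  | cons y l ih =>
    have hya : ¬ (y == a) = true := by simp; rintro rfl; exact ha (List.mem_cons_self)
    have h1 : PySem.Set.add (a :: s) y = a :: PySem.Set.add s y := by
      simp only [PySem.Set.add, PySem.Set.contains, List.contains_cons, hya]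
      by_cases h : y ∈ s <;> simp [h]
    simp only [List.foldl_cons, h1]
    exact ih (fun hm => ha (List.mem_cons_of_mem _ hm))


lemma foldl_add_mem {s : List Int} (l : List Int) (h : ∀ y ∈ l, y ∈ s) :
    l.foldl PySem.Set.add s = s := by
  induction l with
  | nil => rfl
  | cons y l ih =>
    have hy : s.contains y = true := by simp [h y List.mem_cons_self]
    simp only [List.foldl_cons, PySem.Set.add, PySem.Set.contains, hy, if_true]
    exact ih (fun z hz => h z (List.mem_cons_of_mem _ hz))


lemma dedup_run (x : Int) (run rest : List Int) (hrun : ∀ y ∈ run, y = x) (hx : x ∉ rest) :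
    PySem.List.dedup (x :: run ++ rest) = x :: PySem.List.dedup rest := by
  simp only [PySem.List.dedup_eq_ofList, PySem.Set.ofList]
  show (x :: run ++ rest).foldl PySem.Set.add [] = x :: rest.foldl PySem.Set.add []
  have h0 : PySem.Set.add ([] : List Int) x = [x] := rfl
  rw [List.cons_append, List.foldl_cons, h0, List.foldl_append]
  rw [foldl_add_mem run (fun y hy => by rw [hrun y hy]; exact List.mem_cons_self)]
  exact foldl_add_cons_notmem x rest hx


lemma not_mem_dropWhile_beq (x : Int) : ∀ (xs : List Int), (∀ y ∈ xs, x ≤ y) →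
    xs.Pairwise (· ≤ ·) → x ∉ xs.dropWhile (fun y => y == x) := by
  intro xs
  induction xs with
  | nil => simp
  | cons y ys ih =>
    intro hle hp
    by_cases hy : (y == x) = true
    · simp only [List.dropWhile_cons]
      rw [if_pos hy]
      exact ih (fun z hz => hle z (List.mem_cons_of_mem _ hz)) (List.pairwise_cons.1 hp).2
    · simp only [List.dropWhile_cons]
      rw [if_neg hy]
      intro hmem
      have hyx : y ≠ x := by simpa using hy
      have hxy : x < y := lt_of_le_of_ne (hle y List.mem_cons_self) (fun he => hyx he.symm)
      rcases List.mem_cons.1 hmem with he | ht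
      · exact hyx he.symm
      · have := (List.pairwise_cons.1 hp).1 x ht
        omega


lemma altGo_spec : ∀ (n : Nat) (m : List Int), m.length ≤ n → m.Pairwise (· ≤ ·) →
    altGo m = (((PySem.List.dedup m).countP (fun a => !(m.count a == 1)) : Int),
               ((PySem.List.dedup m).countP (fun a => m.count a == 1) : Int)) := by
  intro n
  induction n with
  | zero =>
    intro m hm _
    have : m = [] := List.eq_nil_of_length_eq_zero (Nat.le_zero.1 hm)
    subst this
    simp [altGo, PySem.List.dedup]
  | succ n ih =>
    intro m hm hsorted
    match m with
    | [] => simp [altGo, PySem.List.dedup]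
    | x :: xs =>
      set run := xs.takeWhile (fun y => y == x) with hrun
      set rest := xs.dropWhile (fun y => y == x) with hrest
      have hxs : xs = run ++ rest := (List.takeWhile_append_dropWhile).symm
      have hrun_all : ∀ y ∈ run, y = x := by
        intro y hy
        have := List.mem_takeWhile_imp hy
        simpa using this
      have hle : ∀ y ∈ xs, x ≤ y := (List.pairwise_cons.1 hsorted).1
      have hrest_sorted : rest.Pairwise (· ≤ ·) :=
        ((List.pairwise_cons.1 hsorted).2).sublist (List.dropWhile_sublist _)
      have hx_notin : x ∉ rest :=
        hrest ▸ not_mem_dropWhile_beq x xs hle (List.pairwise_cons.1 hsorted).2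
      have hcount_run : run.count x = run.length :=
        List.count_eq_length.2 (fun y hy => ((hrun_all y hy).symm ▸ rfl))
      have hcount_rest0 : rest.count x = 0 := List.count_eq_zero.2 hx_notin
      have hcount_x : (x :: xs).count x = run.length + 1 := by
        simp [hxs, List.count_cons, List.count_append, hcount_run, hcount_rest0]
      have hcount_other : ∀ a, a ≠ x → (x :: xs).count a = rest.count a := by
        intro a ha
        have h1 : run.count a = 0 := List.count_eq_zero.2 (fun hmem => ha (hrun_all a hmem))
        simp [hxs, List.count_cons, List.count_append, h1,
          (show ¬ (x == a) = true by simpa using fun he => ha he.symm)]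
      have hdedup : PySem.List.dedup (x :: xs) = x :: PySem.List.dedup rest := by
        rw [hxs]
        exact dedup_run x run rest hrun_all hx_notin
      have hrest_len : rest.length ≤ n := by
        rw [hrest]
        have := List.length_dropWhile_le (fun y => y == x) xs
        simp only [List.length_cons] at hm
        omega
      have hIH := ih rest hrest_len hrest_sorted
      have hcongr1 : (PySem.List.dedup rest).countP (fun a => (x :: xs).count a == 1)
          = (PySem.List.dedup rest).countP (fun a => rest.count a == 1) := by
        apply List.countP_congr
        intro a ha
        have hmem : a ∈ rest := (PySem.List.mem_dedup rest a).1 ha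
        rw [hcount_other a (fun he => hx_notin (he ▸ hmem))]
      have hcongr2 : (PySem.List.dedup rest).countP (fun a => !((x :: xs).count a == 1))
          = (PySem.List.dedup rest).countP (fun a => !(rest.count a == 1)) := by
        apply List.countP_congr
        intro a ha
        have hmem : a ∈ rest := (PySem.List.mem_dedup rest a).1 ha
        rw [hcount_other a (fun he => hx_notin (he ▸ hmem))]
      rw [altGo]
      simp only [← hrun, ← hrest, hIH, hdedup, List.countP_cons, hcongr1, hcongr2, hcount_x]
      by_cases h0 : run.length = 0
      · simp [h0, hcount_x]
      · have h1 : ¬ (run.length + 1 = 1) := by omega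
        simp [h0, hcount_x, h1]


lemma solve_alt_closed (l : List Int) :
    solve_alt l = (((pvFreqs l).length : Int) - ((pvFreqs l).count 1 : Nat))
      + 2 * ((((pvFreqs l).count 1 : Nat) + 1) / 2) := by
  unfold solve_alt
  set s := PySem.List.sorted l (fun x => x) false with hs
  have hperm : s.Perm l := PySem.List.sorted_perm l (fun x => x) false
  have hpair : s.Pairwise (· ≤ ·) := PySem.List.sorted_pairwise l (fun x => x)
  have hgo := altGo_spec s.length s le_rfl hpair
  have hdperm : (PySem.List.dedup s).Perm (PySem.Set.ofList l) := by
    rw [List.perm_ext_iff_of_nodup (PySem.List.nodup_dedup s) (PySem.Set.nodup_ofList l)]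
    intro a
    rw [PySem.List.mem_dedup, PySem.Set.mem_ofList, hperm.mem_iff]
  have hcnt : ∀ (p : Int → Bool),
      (PySem.List.dedup s).countP p = (PySem.Set.ofList l).countP p :=
    fun p => hdperm.countP_eq p
  have hcount_eq : ∀ a, s.count a = l.count a := fun a => hperm.count_eq a
  have hc1 : (pvFreqs l).count 1 = (PySem.Set.ofList l).countP (fun k => l.count k == 1) := by
    rw [List.count_eq_countP, pvFreqs, List.countP_map]
    apply List.countP_congr
    intro k _
    simp [Function.comp_def, Nat.cast_inj]
  have hlen : (pvFreqs l).length = (PySem.Set.ofList l).length := by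
    simp [pvFreqs]
  have hsub : (PySem.Set.ofList l).countP (fun k => !(l.count k == 1))
      = (PySem.Set.ofList l).length - (PySem.Set.ofList l).countP (fun k => l.count k == 1) := by
    have := List.length_eq_countP_add_countP (fun k => l.count k == 1)
      (l := PySem.Set.ofList l)
    simp only [decide_not, Bool.decide_eq_true] at this
    omega
  have hc1' : (PySem.List.dedup s).countP (fun a => s.count a == 1)
      = (pvFreqs l).count 1 := by
    rw [hcnt, hc1]
    apply List.countP_congr
    intro k _
    rw [hcount_eq]
  have hother : (PySem.List.dedup s).countP (fun a => !(s.count a == 1))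
      = (pvFreqs l).length - (pvFreqs l).count 1 := by
    rw [show (fun a => !(s.count a == 1)) = (fun a => !(l.count a == 1)) from
      funext fun a => by rw [hcount_eq]]
    rw [hcnt, hsub, hlen, hc1]
  show (altGo s).1 + 2 * PySem.Int.floordiv ((altGo s).2 + 1) 2 = _
  rw [hgo]
  simp only [hc1', hother]
  rw [PySem.Int.floordiv_eq_ediv_of_pos (by norm_num)]
  have hle : (pvFreqs l).count 1 ≤ (pvFreqs l).length := List.count_le_length
  push_cast [Nat.cast_sub hle]
  rw [show ((((pvFreqs l).count 1 : Nat) : Int) + 1) / 2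
      = (((((pvFreqs l).count 1 : Nat) + 1) / 2 : Nat) : Int) by push_cast; rfl]

lemma main_eq (l : List Int) : solve l = solve_alt l := by
  rw [solve_closed, solve_alt_closed]
  set F := pvFreqs l with hF
  set c1 : Nat := F.count 1 with hc1
  by_cases hmem : (1 : Int) ∈ PySem.Set.ofList F
  · have hpos : 0 < c1 := by
      rw [hc1, List.count_pos_iff]
      rwa [PySem.Set.mem_ofList] at hmem
    rw [if_pos hmem]
    omega
  · have hz : c1 = 0 := by
      rw [hc1, List.count_eq_zero]
      intro hmem1
      exact hmem ((PySem.Set.mem_ofList F 1).mpr hmem1)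
    rw [if_neg hmem, hz]
    simp

-- ===== VERDICT (by name: the statement is the Claim_ definition above) =====
theorem solve_spec : Claim_equal_solve := by
  intro l _
  unfold Spec_solve
  exact main_eq l
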